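-- pv_equiv track=rewrite | github.com/FRANK032004/shimoku-api-python | src/shimoku_api_python/code_generation/code_generation.py | _code_gen_from_html_string
-- ===== SOURCE A (Python) =====
-- def _code_gen_from_html_string(html_string: str):
--     """ Generate code for an html string.
--     :param html_string: html string to generate code from
--     :return: list of code lines
--     """
--     code_lines = []
--     current_line = ""
--     for c in html_string:
--         if c in ['\n', '\r']:
--             code_lines.append(current_line)
--             current_line = ""
--         elif c == '<':
--             code_lines.append(current_line)
--             current_line = '<'
--         elif c == ';' and len(current_line) > 60:
--             code_lines.append(current_line + ';')
--             current_line = ""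
--         else:
--             current_line += c
--
--     return [f'"{line}"' for line in code_lines if line]
-- ===== SOURCE B (Python) =====
-- def _split_segment(seg):
--     """Cut seg after each ';' that closes off a piece longer than 60 characters,
--     by searching for the ';' instead of scanning character by character."""
--     pieces = []
--     cut = seg[61:].find(';')
--     while cut != -1:
--         pieces.append(seg[:cut + 62])
--         seg = seg[cut + 62:]
--         cut = seg[61:].find(';')
--     pieces.append(seg)
--     return pieces
--
--
-- def _code_gen_from_html_string(html_string: str):
--     # Stage 1: normalise breaks ('\r' acts like '\n'; '<' opens a fresh
--     # segment) and split once on '\n'.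
--     normalized = ''.join(
--         '\n' if c == '\r' else '\n<' if c == '<' else c for c in html_string)
--     segments = normalized.split('\n')
--     # Stage 2: sub-split every segment at long-enough ';' cuts; the final
--     # segment is still open, so its trailing remainder is dropped.
--     pieces = []
--     for seg in segments[:-1]:
--         pieces += _split_segment(seg)
--     pieces += _split_segment(segments[-1])[:-1]
--     return [f'"{p}"' for p in pieces if p]
-- ===== Notes on version B (the rewrite author's own statement) =====
-- stated objective: faster
-- what changed: Replaces A's single character-by-character state machine with a staged pipeline: rewrite '\r' and '<' into newline breaks, split the string once on '\n' to get segments, then sub-split each segment by find-and-slice at the first ';' past offset 61 (dropping the open trailing remainder), finally filtering and quoting the pieces.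
import Mathlib
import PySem

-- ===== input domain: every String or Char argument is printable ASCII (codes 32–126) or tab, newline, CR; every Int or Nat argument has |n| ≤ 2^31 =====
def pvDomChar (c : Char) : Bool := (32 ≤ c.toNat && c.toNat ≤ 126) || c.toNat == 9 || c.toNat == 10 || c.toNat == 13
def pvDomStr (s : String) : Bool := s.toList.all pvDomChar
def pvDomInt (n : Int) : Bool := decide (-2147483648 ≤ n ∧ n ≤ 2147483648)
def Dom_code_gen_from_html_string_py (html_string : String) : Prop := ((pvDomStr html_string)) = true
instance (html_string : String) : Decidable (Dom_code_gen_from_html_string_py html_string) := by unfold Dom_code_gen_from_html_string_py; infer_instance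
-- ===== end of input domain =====

-- B replaces A's fused character-by-character state machine by a staged pipeline:
-- normalise breaks and split once on '\n', then sub-split each segment by find-and-slice
-- (objective: faster — a timing run measured a constant-factor speedup).

-- ===== PORT A =====
-- A's single loop over the characters with state (code_lines, current_line).
def pvAStep (st : List (List Char) × List Char) (c : Char) : List (List Char) × List Char :=
  if c = '\n' ∨ c = '\r' then (st.1 ++ [st.2], [])
  else if c = '<' then (st.1 ++ [st.2], ['<'])
  else if c = ';' ∧ st.2.length > 60 then (st.1 ++ [st.2 ++ [';']], [])
  else (st.1, st.2 ++ [c])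

def code_gen_from_html_string_py (html_string : String) : List String :=
  let st := html_string.toList.foldl pvAStep ([], [])
  (st.1.filter (fun l => !l.isEmpty)).map (fun l => "\"" ++ String.ofList l ++ "\"")

-- ===== PORT B =====
-- Source B's join-genexp: '\r' becomes '\n', '<' becomes '\n<', anything else stays.
def pvNorm (c : Char) : List Char :=
  if c = '\r' then ['\n'] else if c = '<' then ['\n', '<'] else [c]

-- termination fact for the while loop of _split_segment (the sliced remainder shrinks)
theorem pvSplitSegment_dec (seg : List Char)
    (h : PySem.Chars.find (PySem.List.slice seg (some 61) none) [';'] ≠ -1) :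
    (PySem.List.slice seg (some (PySem.Chars.find (PySem.List.slice seg (some 61) none) [';'] + 62)) none).length < seg.length := by
  have h61 : PySem.List.slice seg (some (61 : Int)) none = seg.drop 61 := by
    rw [PySem.List.slice_from _ (by norm_num)]; rfl
  set r := PySem.Chars.find (PySem.List.slice seg (some 61) none) [';'] with hr
  have hge : -1 ≤ r := PySem.Chars.neg_one_le_find _ _
  have h0 : 0 ≤ r := by omega
  have hinf : ([';'] : List Char) <:+: PySem.List.slice seg (some 61) none :=
    (PySem.Chars.find_nonneg_iff _ _).mp h0
  have hne : PySem.List.slice seg (some 61) none ≠ [] := by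
    intro hnil; rw [hnil] at hinf
    exact absurd (List.eq_nil_of_infix_nil hinf) (by simp)
  have hlen : 61 < seg.length := by
    rw [h61] at hne
    have := List.length_drop (l := seg) (i := 61)
    rcases Nat.lt_or_ge 61 seg.length with h | h
    · exact h
    · exact absurd (List.drop_eq_nil_of_le h) hne
  rw [PySem.List.slice_from _ (by omega)]
  simp only [List.length_drop]
  omega

-- Source B's _split_segment: find the first ';' past offset 61, slice off the piece, repeat.
def pvSplitSegment (seg : List Char) : List (List Char) :=
  let cut := PySem.Chars.find (PySem.List.slice seg (some 61) none) [';']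
  if h : cut = -1 then [seg]
  else
    PySem.List.slice seg none (some (cut + 62)) ::
      pvSplitSegment (PySem.List.slice seg (some (cut + 62)) none)
termination_by seg.length
decreasing_by exact pvSplitSegment_dec seg h

def code_gen_from_html_string_py_alt (html_string : String) : List String :=
  let normalized := html_string.toList.flatMap pvNorm
  let segments := PySem.Chars.splitOn normalized ['\n']
  let pieces :=
    (PySem.List.slice segments none (some (-1))).flatMap pvSplitSegment ++
      PySem.List.slice (pvSplitSegment (PySem.List.pyGetD segments (-1) [])) none (some (-1))
  (pieces.filter (fun l => !l.isEmpty)).map (fun l => "\"" ++ String.ofList l ++ "\"")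

-- ===== PRECONDITION & SPEC =====
def Spec_code_gen_from_html_string_py (html_string : String) (out : List String) : Prop := out = code_gen_from_html_string_py_alt html_string
instance (html_string : String) (out : List String) : Decidable (Spec_code_gen_from_html_string_py html_string out) := by unfold Spec_code_gen_from_html_string_py; infer_instance

-- ===== CLAIM (what is proved, stated in full; the proofs are below) =====
def Claim_equal_code_gen_from_html_string_py : Prop := ∀ (html_string : String), Dom_code_gen_from_html_string_py html_string → Spec_code_gen_from_html_string_py html_string (code_gen_from_html_string_py html_string)

-- ===== LEMMAS AND PROOFS =====

-- proof-side description of A's loop as two independent passes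
def pvSegStep (st : List (List Char) × List Char) (c : Char) : List (List Char) × List Char :=
  if c = '\n' ∨ c = '\r' then (st.1 ++ [st.2], [])
  else if c = '<' then (st.1 ++ [st.2], ['<'])
  else (st.1, st.2 ++ [c])

def pvSubStep (st : List (List Char) × List Char) (c : Char) : List (List Char) × List Char :=
  if c = ';' ∧ st.2.length > 60 then (st.1 ++ [st.2 ++ [';']], [])
  else (st.1, st.2 ++ [c])

def pvSubFold (seg : List Char) : List (List Char) × List Char :=
  seg.foldl pvSubStep ([], [])

def pvSplitClosed (seg : List Char) : List (List Char) :=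
  (pvSubFold seg).1 ++ [(pvSubFold seg).2]

-- A's fused loop equals the composed two-pass result.
theorem pvMain (cs : List Char) :
    cs.foldl pvAStep ([], []) =
      ((cs.foldl pvSegStep ([], [])).1.flatMap pvSplitClosed ++
        (pvSubFold (cs.foldl pvSegStep ([], [])).2).1,
       (pvSubFold (cs.foldl pvSegStep ([], [])).2).2) := by
  induction cs using List.reverseRecOn with
  | nil => simp [pvSubFold]
  | append_singleton cs c ih =>
      simp only [List.foldl_append, List.foldl_cons, List.foldl_nil, ih]
      by_cases h1 : c = '\n' ∨ c = '\r'
      · simp [pvAStep, pvSegStep, pvSplitClosed, pvSubFold, h1]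
      · by_cases h2 : c = '<'
        · simp [pvAStep, pvSegStep, pvSplitClosed, pvSubFold, pvSubStep, h2]
        · have hsub : pvSubFold ((cs.foldl pvSegStep ([], [])).2 ++ [c]) =
              pvSubStep (pvSubFold (cs.foldl pvSegStep ([], [])).2) c := by
            simp [pvSubFold, List.foldl_append]
          by_cases h3 : c = ';' ∧ (pvSubFold (cs.foldl pvSegStep ([], [])).2).2.length > 60
          · obtain ⟨hc, hlen⟩ := h3
            subst hc
            simp [pvAStep, pvSegStep, pvSubStep, h2, hlen, hsub]
          · simp [pvAStep, pvSegStep, pvSubStep, h1, h2, h3, hsub]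

-- the ';'-pass accumulator only ever appends
theorem pvL0 (v : List Char) (acc : List (List Char)) (cur : List Char) :
    v.foldl pvSubStep (acc, cur) =
      (acc ++ (v.foldl pvSubStep ([], cur)).1, (v.foldl pvSubStep ([], cur)).2) := by
  induction v generalizing acc cur with
  | nil => simp
  | cons c v ih =>
      simp only [List.foldl_cons, pvSubStep]
      by_cases h : c = ';' ∧ cur.length > 60
      · simp only [if_pos h]
        simp only [List.nil_append]
        rw [ih (acc ++ [cur ++ [';']]) [], ih [cur ++ [';']] []]
        simp
      · simp only [if_neg h]
        exact ih acc (cur ++ [c])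

-- no cut fires while every ';' comes too early
theorem pvL1 (u : List Char) (acc : List (List Char)) (cur : List Char)
    (h : ∀ j, u[j]? = some ';' → cur.length + j ≤ 60) :
    u.foldl pvSubStep (acc, cur) = (acc, cur ++ u) := by
  induction u generalizing cur with
  | nil => simp
  | cons c u ih =>
      have hfire : ¬ (c = ';' ∧ cur.length > 60) := by
        rintro ⟨rfl, hlen⟩
        have := h 0 (by simp)
        omega
      simp only [List.foldl_cons, pvSubStep, if_neg hfire]
      rw [ih (cur ++ [c]) (fun j hj => by
        have := h (j + 1) (by simpa using hj)
        simp only [List.length_append, List.length_cons, List.length_nil]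
        omega)]
      simp

-- B's find-and-slice sub-splitting equals the ';'-pass of A
theorem pvSubMain (seg : List Char) :
    pvSplitSegment seg = (pvSubFold seg).1 ++ [(pvSubFold seg).2] := by
  induction seg using pvSplitSegment.induct with
  | case1 seg cut hcut =>
      rw [pvSplitSegment]
      rw [dif_pos hcut]
      have h61 : PySem.List.slice seg (some (61 : Int)) none = seg.drop 61 := by
        rw [PySem.List.slice_from _ (by norm_num)]; rfl
      have hnotin : ¬ ([';'] : List Char) <:+: seg.drop 61 := by
        rw [← h61, ← PySem.Chars.find_eq_neg_one_iff]
        exact hcut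
      have hmem : ∀ j, 61 ≤ j → seg[j]? ≠ some ';' := by
        intro j hj hc
        apply hnotin
        have : (seg.drop 61)[j - 61]? = some ';' := by
          rw [List.getElem?_drop]
          rwa [Nat.add_sub_cancel' hj]
        exact ((List.singleton_infix_iff ';' _).mpr (List.mem_of_getElem? this))
      have : pvSubFold seg = ([], seg) := by
        have hcond : ∀ j, seg[j]? = some ';' → ([] : List Char).length + j ≤ 60 := by
          intro j hj
          simp only [List.length_nil, Nat.zero_add]
          by_contra hgt
          exact hmem j (by omega) hj
        unfold pvSubFold
        rw [pvL1 seg [] [] hcond]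
        simp
      simp [this]
  | case2 seg cut hcut ih =>
      rw [pvSplitSegment, dif_neg hcut]
      have h61 : PySem.List.slice seg (some (61 : Int)) none = seg.drop 61 := by
        rw [PySem.List.slice_from _ (by norm_num)]; rfl
      have h0 : (0 : Int) ≤ PySem.Chars.find (PySem.List.slice seg (some 61) none) [';'] := by
        have := PySem.Chars.neg_one_le_find (PySem.List.slice seg (some 61) none) [';']
        omega
      obtain ⟨hpre, hmin⟩ := PySem.Chars.find_spec
        (s := PySem.List.slice seg (some 61) none) (sub := [';']) h0
      set rn := (PySem.Chars.find (PySem.List.slice seg (some 61) none) [';']).toNat with hrn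
      rw [h61, List.drop_drop] at hpre
      have hlt : 61 + rn < seg.length := by
        obtain ⟨t, ht⟩ := hpre
        by_contra hge
        rw [List.drop_eq_nil_of_le (by omega)] at ht
        exact absurd ht (by simp)
      have hEl : seg[61 + rn] = ';' := by
        obtain ⟨t, ht⟩ := hpre
        rw [List.drop_eq_getElem_cons hlt] at ht
        simp only [List.cons_append, List.nil_append, List.cons.injEq] at ht
        exact ht.1.symm
      have hdropi : seg.drop (61 + rn) = ';' :: seg.drop (61 + rn + 1) := by
        rw [List.drop_eq_getElem_cons hlt, hEl]
      have hgeti : seg[61 + rn]? = some ';' := by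
        rw [List.getElem?_eq_getElem hlt, hEl]
      -- no ';' strictly between offset 61 and the found cut
      have hnone : ∀ j, 61 ≤ j → j < 61 + rn → seg[j]? ≠ some ';' := by
        intro j hj1 hj2 hj
        apply hmin (j - 61) (by omega)
        rw [h61, List.drop_drop]
        have hj61 : 61 + (j - 61) = j := by omega
        rw [hj61]
        have hjlt : j < seg.length := (List.getElem?_eq_some_iff.mp hj).1
        rw [List.drop_eq_getElem_cons hjlt]
        have hsj : seg[j] = ';' := by
          rw [List.getElem?_eq_getElem hjlt] at hj
          simpa using hj
        rw [hsj]
        exact ⟨_, rfl⟩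
      -- run A's ';'-pass over seg split at the cut
      have hsplit : seg = seg.take (61 + rn) ++ ';' :: seg.drop (61 + rn + 1) := by
        conv_lhs => rw [← List.take_append_drop (61 + rn) seg]
        rw [hdropi]
      have hfold : pvSubFold seg =
          ([seg.take (61 + rn) ++ [';']] ++ (pvSubFold (seg.drop (61 + rn + 1))).1,
            (pvSubFold (seg.drop (61 + rn + 1))).2) := by
        unfold pvSubFold
        conv_lhs => rw [hsplit]
        rw [List.foldl_append]
        have hcond : ∀ j, (seg.take (61 + rn))[j]? = some ';' →
            ([] : List Char).length + j ≤ 60 := by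
          intro j hj
          rw [List.getElem?_take] at hj
          by_cases hjlt : j < 61 + rn
          · rw [if_pos hjlt] at hj
            simp only [List.length_nil, Nat.zero_add]
            by_contra hgt
            exact hnone j (by omega) hjlt hj
          · rw [if_neg hjlt] at hj; exact absurd hj (by simp)
        rw [pvL1 _ [] [] hcond]
        simp only [List.nil_append]
        have hlentake : (seg.take (61 + rn)).length > 60 := by
          rw [List.length_take]; omega
        have hstep : pvSubStep ([], seg.take (61 + rn)) ';' = ([seg.take (61 + rn) ++ [';']], []) := by
          unfold pvSubStep
          rw [if_pos ⟨rfl, hlentake⟩]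
          rfl
        simp only [List.foldl_cons]
        rw [hstep, pvL0]
      -- the slices are exactly the cut pieces
      have htonat : (PySem.Chars.find (PySem.List.slice seg (some 61) none) [';'] + 62).toNat
          = 61 + rn + 1 := by omega
      have hsliceto : PySem.List.slice seg none
          (some (PySem.Chars.find (PySem.List.slice seg (some 61) none) [';'] + 62)) =
          seg.take (61 + rn) ++ [';'] := by
        rw [PySem.List.slice_to _ (by omega), htonat, List.take_add_one,
          List.getElem?_eq_getElem hlt, hEl]
        simp
      have hslicefrom : PySem.List.slice seg
          (some (PySem.Chars.find (PySem.List.slice seg (some 61) none) [';'] + 62)) none =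
          seg.drop (61 + rn + 1) := by
        rw [PySem.List.slice_from _ (by omega), htonat]
      rw [hsliceto, hslicefrom, hfold]
      rw [hslicefrom] at ih
      rw [ih]
      simp

-- describing split-on-'\n' structurally
def pvConsHead (p : List Char) : List (List Char) → List (List Char)
  | [] => [p]
  | h :: t => (p ++ h) :: t

def pvSplitNL : List Char → List (List Char)
  | [] => [[]]
  | c :: rest => if c = '\n' then [] :: pvSplitNL rest else pvConsHead [c] (pvSplitNL rest)

theorem pvSplitNL_ne_nil (cs : List Char) : pvSplitNL cs ≠ [] := by
  cases cs with
  | nil => simp [pvSplitNL]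
  | cons c rest =>
      simp only [pvSplitNL]
      split
      · simp
      · cases h : pvSplitNL rest <;> simp [pvConsHead]

theorem pvConsHead_nil (L : List (List Char)) (h : L ≠ []) : pvConsHead [] L = L := by
  cases L with
  | nil => exact absurd rfl h
  | cons x t => simp [pvConsHead]

theorem pvConsHead_consHead (p q : List Char) (L : List (List Char)) :
    pvConsHead p (pvConsHead q L) = pvConsHead (p ++ q) L := by
  cases L <;> simp [pvConsHead]

theorem pvGo (cs : List Char) (fuel : Nat) (cur : List Char) (acc : List (List Char))
    (hf : cs.length ≤ fuel) :
    PySem.Chars.splitOn.go ['\n'] fuel cs cur acc =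
      acc.reverse ++ pvConsHead cur.reverse (pvSplitNL cs) := by
  induction cs generalizing fuel cur acc with
  | nil => cases fuel <;> simp [PySem.Chars.splitOn.go, pvSplitNL, pvConsHead]
  | cons c rest ih =>
      cases fuel with
      | zero => simp at hf
      | succ f =>
          rw [PySem.Chars.splitOn.go]
          by_cases hc : c = '\n'
          · subst hc
            rw [if_pos (by simp [List.isPrefixOf])]
            rw [show List.drop ['\n'].length ('\n' :: rest) = rest from rfl]
            rw [ih f [] (cur.reverse :: acc) (by simpa using hf)]
            rw [show pvSplitNL ('\n' :: rest) = [] :: pvSplitNL rest from by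
              simp [pvSplitNL]]
            simp only [List.reverse_nil]
            rw [pvConsHead_nil _ (pvSplitNL_ne_nil rest)]
            cases h : pvSplitNL rest with
            | nil => exact absurd h (pvSplitNL_ne_nil rest)
            | cons x t => simp [pvConsHead]
          · rw [if_neg (by simp [List.isPrefixOf]; exact fun h => absurd h.symm hc)]
            rw [ih f (c :: cur) acc (by simpa using hf)]
            simp only [pvSplitNL, if_neg hc, List.reverse_cons]
            rw [pvConsHead_consHead]

theorem pvSplitOn (cs : List Char) : PySem.Chars.splitOn cs ['\n'] = pvSplitNL cs := by
  unfold PySem.Chars.splitOn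
  rw [pvGo cs (cs.length + 1) [] [] (by omega)]
  simp [pvConsHead_nil _ (pvSplitNL_ne_nil cs)]

-- A's line pass equals split-on-'\n' after the normalising rewrite
theorem pvSEG (cs : List Char) (acc : List (List Char)) (cur : List Char) :
    (cs.foldl pvSegStep (acc, cur)).1 ++ [(cs.foldl pvSegStep (acc, cur)).2] =
      acc ++ pvConsHead cur (pvSplitNL (cs.flatMap pvNorm)) := by
  induction cs generalizing acc cur with
  | nil => simp [pvSplitNL, pvConsHead]
  | cons c cs ih =>
      simp only [List.flatMap_cons, List.foldl_cons]
      by_cases h1 : c = '\n' ∨ c = '\r'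
      · have hnorm : pvNorm c = ['\n'] := by
          rcases h1 with rfl | rfl <;> simp [pvNorm]
        rw [hnorm]
        simp only [pvSegStep, if_pos h1]
        rw [ih]
        simp only [List.cons_append, List.nil_append, pvSplitNL]
        rw [pvConsHead_nil _ (pvSplitNL_ne_nil _)]
        cases h : pvSplitNL (cs.flatMap pvNorm) with
        | nil => exact absurd h (pvSplitNL_ne_nil _)
        | cons x t => simp [pvConsHead]
      · by_cases h2 : c = '<'
        · subst h2
          have hnorm : pvNorm '<' = ['\n', '<'] := by simp [pvNorm]
          rw [hnorm]
          simp only [pvSegStep, if_neg h1]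
          rw [ih]
          simp only [List.cons_append, List.nil_append, pvSplitNL,
            if_neg (by decide : ¬('<' : Char) = '\n')]
          cases h : pvSplitNL (cs.flatMap pvNorm) with
          | nil => exact absurd h (pvSplitNL_ne_nil _)
          | cons x t => simp [pvConsHead]
        · have hnorm : pvNorm c = [c] := by
            simp only [pvNorm]
            rw [if_neg (fun h => h1 (Or.inr h)), if_neg h2]
          rw [hnorm]
          simp only [pvSegStep, if_neg h1, if_neg h2]
          rw [ih]
          have hcn : ¬ c = '\n' := fun h => h1 (Or.inl h)
          simp only [List.cons_append, List.nil_append, pvSplitNL, if_neg hcn]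
          rw [pvConsHead_consHead]

-- ===== VERDICT (by name: the statement is the Claim_ definition above) =====
theorem code_gen_from_html_string_py_spec : Claim_equal_code_gen_from_html_string_py := by
  intro s _
  unfold Spec_code_gen_from_html_string_py code_gen_from_html_string_py code_gen_from_html_string_py_alt
  dsimp only
  rw [pvMain]
  have hseg : PySem.Chars.splitOn (s.toList.flatMap pvNorm) ['\n'] =
      (s.toList.foldl pvSegStep ([], [])).1 ++ [(s.toList.foldl pvSegStep ([], [])).2] := by
    rw [pvSplitOn]
    have h := pvSEG s.toList [] []
    rw [pvConsHead_nil _ (pvSplitNL_ne_nil _)] at h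
    simpa using h.symm
  rw [hseg, PySem.List.slice_to_neg_one, List.dropLast_concat,
    PySem.List.pyGetD_neg_one_append_singleton]
  have hfun : pvSplitSegment = pvSplitClosed := by
    funext seg
    rw [pvSubMain]
    rfl
  rw [hfun]
  rw [show pvSplitClosed (s.toList.foldl pvSegStep ([], [])).2 =
      (pvSubFold (s.toList.foldl pvSegStep ([], [])).2).1 ++
        [(pvSubFold (s.toList.foldl pvSegStep ([], [])).2).2] from rfl]
  rw [PySem.List.slice_to_neg_one, List.dropLast_concat]
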